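-- pv_equiv track=rewrite | github.com/ioas0316-cloud/elysia-fractal-engine_V1 | Core/Foundation/elysia_network.py | _classify_subproblem
-- ===== SOURCE A (Python) =====
-- def _classify_subproblem(subproblem: str) -> str:
--     """Classify what type of subproblem this is."""
--     subproblem_lower = subproblem.lower()
--
--     if any(word in subproblem_lower for word in ["creative", "imagine", "design", "innovate"]):
--         return "creativity"
--     elif any(word in subproblem_lower for word in ["emotion", "feel", "empathy"]):
--         return "emotion"
--     elif any(word in subproblem_lower for word in ["logic", "analyze", "reason", "prove"]):
--         return "logic"
--     elif any(word in subproblem_lower for word in ["pattern", "trend"]):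
--         return "pattern"
--     elif any(word in subproblem_lower for word in ["integrate", "combine", "synthesize"]):
--         return "integration"
--     elif any(word in subproblem_lower for word in ["know", "fact", "information"]):
--         return "knowledge"
--     else:
--         return "generalist"
-- ===== SOURCE B (Python) =====
-- # B: single left-to-right scan of the text; at each position, match keywords
-- # starting there (keyword -> priority table) and keep the best (lowest) priority.
-- _KW = {
--     "creative": 0, "imagine": 0, "design": 0, "innovate": 0,
--     "emotion": 1, "feel": 1, "empathy": 1,
--     "logic": 2, "analyze": 2, "reason": 2, "prove": 2,
--     "pattern": 3, "trend": 3,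
--     "integrate": 4, "combine": 4, "synthesize": 4,
--     "know": 5, "fact": 5, "information": 5,
-- }
-- _CATS = ["creativity", "emotion", "logic", "pattern",
--          "integration", "knowledge", "generalist"]
--
--
-- def _classify_subproblem(subproblem: str) -> str:
--     t = subproblem.lower()
--     best = 6
--     for i in range(len(t)):
--         for kw, p in _KW.items():
--             if p < best and t.startswith(kw, i):
--                 best = p
--     return _CATS[best]
-- ===== Notes on version B (the rewrite author's own statement) =====
-- stated objective: alternative
-- what changed: Instead of six any(word in s) substring tests in a ladder, B scans the lowercased text once position by position, matches keywords from a keyword-to-priority table at each position, and keeps the minimum priority, indexing a category table at the end.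
import Mathlib
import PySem

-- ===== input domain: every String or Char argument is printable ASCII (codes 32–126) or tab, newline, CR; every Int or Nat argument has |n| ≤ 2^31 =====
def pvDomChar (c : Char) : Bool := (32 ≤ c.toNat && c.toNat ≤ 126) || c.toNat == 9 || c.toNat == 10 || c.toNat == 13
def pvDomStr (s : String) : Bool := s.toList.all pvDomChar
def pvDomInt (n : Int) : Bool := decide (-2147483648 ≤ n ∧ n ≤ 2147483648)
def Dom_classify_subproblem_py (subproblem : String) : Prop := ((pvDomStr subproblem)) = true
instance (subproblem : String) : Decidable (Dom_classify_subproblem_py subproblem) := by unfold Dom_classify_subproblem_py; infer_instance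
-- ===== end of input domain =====

-- B replaces A's ladder of substring ('in') tests by a single positional scan of the
-- lowercased text that matches keywords from a keyword→priority table at each position
-- and keeps the minimum priority (objective: alternative, same cost).


-- ===== PORT A =====
def classify_subproblem_py (subproblem : String) : String :=
  let subproblem_lower := PySem.Str.lower subproblem
  if (["creative", "imagine", "design", "innovate"].any fun word => PySem.Str.isIn word subproblem_lower) then
    "creativity"
  else if (["emotion", "feel", "empathy"].any fun word => PySem.Str.isIn word subproblem_lower) then
    "emotion"
  else if (["logic", "analyze", "reason", "prove"].any fun word => PySem.Str.isIn word subproblem_lower) then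
    "logic"
  else if (["pattern", "trend"].any fun word => PySem.Str.isIn word subproblem_lower) then
    "pattern"
  else if (["integrate", "combine", "synthesize"].any fun word => PySem.Str.isIn word subproblem_lower) then
    "integration"
  else if (["know", "fact", "information"].any fun word => PySem.Str.isIn word subproblem_lower) then
    "knowledge"
  else
    "generalist"

-- ===== PORT B =====
-- keyword → priority table (Source B's _KW, insertion order)
def pvKW : List (List Char × Nat) :=
  [("creative".toList, 0), ("imagine".toList, 0), ("design".toList, 0), ("innovate".toList, 0),
   ("emotion".toList, 1), ("feel".toList, 1), ("empathy".toList, 1),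
   ("logic".toList, 2), ("analyze".toList, 2), ("reason".toList, 2), ("prove".toList, 2),
   ("pattern".toList, 3), ("trend".toList, 3),
   ("integrate".toList, 4), ("combine".toList, 4), ("synthesize".toList, 4),
   ("know".toList, 5), ("fact".toList, 5), ("information".toList, 5)]

def pvCATS : List String :=
  ["creativity", "emotion", "logic", "pattern", "integration", "knowledge", "generalist"]

-- the positional scan: t.startswith(kw, i) is 'kw <+: drop i' = Chars.startswith (cs.drop i) kw
def pvBest (cs : List Char) : Nat :=
  (List.range cs.length).foldl
    (fun best i =>
      pvKW.foldl
        (fun b kp => if kp.2 < b ∧ PySem.Chars.startswith (cs.drop i) kp.1 then kp.2 else b)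
        best)
    6

def classify_subproblem_py_alt (subproblem : String) : String :=
  pvCATS.getD (pvBest (PySem.Str.lower subproblem).toList) "generalist"

-- ===== PRECONDITION & SPEC =====
def Spec_classify_subproblem_py (subproblem : String) (out : String) : Prop := out = classify_subproblem_py_alt subproblem
instance (subproblem : String) (out : String) : Decidable (Spec_classify_subproblem_py subproblem out) := by unfold Spec_classify_subproblem_py; infer_instance

-- ===== CLAIM (what is proved, stated in full; the proofs are below) =====
def Claim_equal_classify_subproblem_py : Prop := ∀ (subproblem : String), Dom_classify_subproblem_py subproblem → Spec_classify_subproblem_py subproblem (classify_subproblem_py subproblem)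

-- ===== LEMMAS AND PROOFS =====

-- matched priorities at one position
def pvSel (cs : List Char) (i : Nat) : List Nat :=
  pvKW.filterMap (fun kp => if PySem.Chars.startswith (cs.drop i) kp.1 then some kp.2 else none)

-- all matched priorities over all positions
def pvL (cs : List Char) : List Nat :=
  (List.range cs.length).flatMap (fun i => pvSel cs i)

-- inner fold = min-fold over the selected priorities at position i
lemma pv_inner (cs : List Char) (i : Nat) :
    ∀ (l : List (List Char × Nat)) (b : Nat),
      l.foldl (fun b kp => if kp.2 < b ∧ PySem.Chars.startswith (cs.drop i) kp.1 then kp.2 else b) b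
        = (l.filterMap (fun kp => if PySem.Chars.startswith (cs.drop i) kp.1 then some kp.2 else none)).foldl min b := by
  intro l
  induction l with
  | nil => intro b; rfl
  | cons kp rest ih =>
      intro b
      simp only [List.foldl_cons, List.filterMap_cons]
      by_cases hm : PySem.Chars.startswith (cs.drop i) kp.1
      · simp only [hm, and_true, if_true, List.foldl_cons]
        rw [ih]
        congr 1
        split <;> omega
      · simp only [hm, Bool.false_eq_true, and_false, if_false]
        exact ih b

-- inner fold specialised to the keyword table
lemma pv_inner' (cs : List Char) (i : Nat) (b : Nat) :
    pvKW.foldl (fun b kp => if kp.2 < b ∧ PySem.Chars.startswith (cs.drop i) kp.1 then kp.2 else b) b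
      = (pvSel cs i).foldl min b := by
  unfold pvSel
  exact pv_inner cs i pvKW b

-- outer fold = min-fold over all selected priorities
lemma pv_outer (cs : List Char) :
    ∀ (ps : List Nat) (b : Nat),
      ps.foldl (fun best i =>
          pvKW.foldl (fun b kp => if kp.2 < b ∧ PySem.Chars.startswith (cs.drop i) kp.1 then kp.2 else b) best) b
        = (ps.flatMap (fun i => pvSel cs i)).foldl min b := by
  intro ps
  induction ps with
  | nil => intro b; simp only [List.foldl_nil, List.flatMap_nil]
  | cons i rest ih =>
      intro b
      simp only [List.foldl_cons, List.flatMap_cons, List.foldl_append]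
      rw [pv_inner', ih]

lemma pvBest_eq (cs : List Char) : pvBest cs = (pvL cs).foldl min 6 := by
  unfold pvBest pvL
  exact pv_outer cs (List.range cs.length) 6

lemma pv_foldl_min_le_init (l : List Nat) (b : Nat) : l.foldl min b ≤ b := by
  induction l generalizing b with
  | nil => simp
  | cons y rest ih =>
      simp only [List.foldl_cons]
      exact le_trans (ih (min b y)) (by omega)

lemma pv_foldl_min_le {l : List Nat} {x : Nat} (h : x ∈ l) (b : Nat) : l.foldl min b ≤ x := by
  induction l generalizing b with
  | nil => cases h
  | cons y rest ih =>
      simp only [List.foldl_cons]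
      rcases List.mem_cons.mp h with rfl | h'
      · exact le_trans (pv_foldl_min_le_init rest (min b x)) (by omega)
      · exact ih h' (min b y)

lemma pv_foldl_min_mem (l : List Nat) (b : Nat) : l.foldl min b = b ∨ l.foldl min b ∈ l := by
  induction l generalizing b with
  | nil => left; rfl
  | cons y rest ih =>
      simp only [List.foldl_cons]
      rcases ih (min b y) with h | h
      · rcases Nat.le_total b y with hby | hyb
        · left; omega
        · right
          have hy : min b y = y := by omega
          rw [h, hy]
          exact List.mem_cons_self
      · right; right; exact h

-- membership in pvL ↔ some keyword of that priority occurs as a substring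
lemma pv_mem_L (cs : List Char) (p : Nat) :
    p ∈ pvL cs ↔ ∃ kp ∈ pvKW, kp.2 = p ∧ PySem.Chars.isIn kp.1 cs = true := by
  unfold pvL pvSel
  constructor
  · rintro h
    rcases List.mem_flatMap.mp h with ⟨i, hi, hsel⟩
    rcases List.mem_filterMap.mp hsel with ⟨kp, hkp, hval⟩
    by_cases hm : PySem.Chars.startswith (cs.drop i) kp.1
    · refine ⟨kp, hkp, ?_, ?_⟩
      · simp [hm] at hval; omega
      · rw [PySem.Chars.isIn_iff_infix]
        exact (((PySem.Chars.startswith_iff _ _).mp hm).isInfix).trans (List.drop_suffix i cs).isInfix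
    · simp [hm] at hval
  · rintro ⟨kp, hkp, hp, hin⟩
    -- every keyword is nonempty
    have hne : kp.1 ≠ [] := by
      revert hkp; unfold pvKW; intro hkp
      fin_cases hkp <;> simp
    rcases (PySem.Chars.exists_prefix_drop_iff_isIn kp.1 cs).mpr hin with ⟨j, hj⟩
    have hjlt : j < cs.length := by
      by_contra hge
      have : cs.drop j = [] := List.drop_eq_nil_of_le (by omega)
      rw [this] at hj
      exact hne (List.prefix_nil.mp hj)
    refine List.mem_flatMap.mpr ⟨j, List.mem_range.mpr hjlt, ?_⟩
    refine List.mem_filterMap.mpr ⟨kp, hkp, ?_⟩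
    rw [(PySem.Chars.startswith_iff _ _).symm] at hj
    simp [hj, hp]

-- every priority in pvL is at most 5
lemma pv_L_le_five (cs : List Char) {p : Nat} (h : p ∈ pvL cs) : p ≤ 5 := by
  rcases (pv_mem_L cs p).mp h with ⟨kp, hkp, hp, _⟩
  subst hp
  revert hkp; unfold pvKW; intro hkp
  fin_cases hkp <;> decide

-- the min-fold picks the first category (in priority order) that occurs in pvL
lemma pv_key (cs : List Char) :
    pvCATS.getD ((pvL cs).foldl min 6) "generalist" =
      if 0 ∈ pvL cs then "creativity"
      else if 1 ∈ pvL cs then "emotion"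
      else if 2 ∈ pvL cs then "logic"
      else if 3 ∈ pvL cs then "pattern"
      else if 4 ∈ pvL cs then "integration"
      else if 5 ∈ pvL cs then "knowledge"
      else "generalist" := by
  set r := (pvL cs).foldl min 6 with hr
  have hmem := pv_foldl_min_mem (pvL cs) 6
  rw [← hr] at hmem
  by_cases h0 : 0 ∈ pvL cs
  · have := pv_foldl_min_le h0 6
    have : r = 0 := by omega
    simp [this, h0, pvCATS]
  · by_cases h1 : 1 ∈ pvL cs
    · have hle := pv_foldl_min_le h1 6
      have hne0 : r ≠ 0 := fun h => h0 (h ▸ (hmem.resolve_left (by omega)))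
      have : r = 1 := by omega
      simp [this, h0, h1, pvCATS]
    · by_cases h2 : 2 ∈ pvL cs
      · have hle := pv_foldl_min_le h2 6
        have hrm : r ∈ pvL cs := hmem.resolve_left (by omega)
        have hne0 : r ≠ 0 := fun h => h0 (h ▸ hrm)
        have hne1 : r ≠ 1 := fun h => h1 (h ▸ hrm)
        have : r = 2 := by omega
        simp [this, h0, h1, h2, pvCATS]
      · by_cases h3 : 3 ∈ pvL cs
        · have hle := pv_foldl_min_le h3 6
          have hrm : r ∈ pvL cs := hmem.resolve_left (by omega)
          have hne0 : r ≠ 0 := fun h => h0 (h ▸ hrm)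
          have hne1 : r ≠ 1 := fun h => h1 (h ▸ hrm)
          have hne2 : r ≠ 2 := fun h => h2 (h ▸ hrm)
          have : r = 3 := by omega
          simp [this, h0, h1, h2, h3, pvCATS]
        · by_cases h4 : 4 ∈ pvL cs
          · have hle := pv_foldl_min_le h4 6
            have hrm : r ∈ pvL cs := hmem.resolve_left (by omega)
            have hne0 : r ≠ 0 := fun h => h0 (h ▸ hrm)
            have hne1 : r ≠ 1 := fun h => h1 (h ▸ hrm)
            have hne2 : r ≠ 2 := fun h => h2 (h ▸ hrm)
            have hne3 : r ≠ 3 := fun h => h3 (h ▸ hrm)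
            have : r = 4 := by omega
            simp [this, h0, h1, h2, h3, h4, pvCATS]
          · by_cases h5 : 5 ∈ pvL cs
            · have hle := pv_foldl_min_le h5 6
              have hrm : r ∈ pvL cs := hmem.resolve_left (by omega)
              have hne0 : r ≠ 0 := fun h => h0 (h ▸ hrm)
              have hne1 : r ≠ 1 := fun h => h1 (h ▸ hrm)
              have hne2 : r ≠ 2 := fun h => h2 (h ▸ hrm)
              have hne3 : r ≠ 3 := fun h => h3 (h ▸ hrm)
              have hne4 : r ≠ 4 := fun h => h4 (h ▸ hrm)
              have : r = 5 := by omega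
              simp [this, h0, h1, h2, h3, h4, h5, pvCATS]
            · have : r = 6 := by
                rcases hmem with h | h
                · exact h
                · exact absurd (pv_L_le_five cs h) (by
                    intro hle5
                    rcases Nat.lt_or_ge r 6 with hlt | hge
                    · interval_cases r <;> simp_all
                    · omega)
              simp [this, h0, h1, h2, h3, h4, h5, pvCATS]

-- ===== VERDICT (by name: the statement is the Claim_ definition above) =====
theorem classify_subproblem_py_spec : Claim_equal_classify_subproblem_py := by
  intro s _
  unfold Spec_classify_subproblem_py classify_subproblem_py classify_subproblem_py_alt
  rw [pvBest_eq, pv_key]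
  simp only [List.any_cons, List.any_nil, Bool.or_eq_true, Bool.false_eq_true, or_false,
    PySem.Str.isIn_eq, pv_mem_L, pvKW]
  simp only [List.mem_cons, List.not_mem_nil, or_false, exists_eq_or_imp, exists_eq_left]
  norm_num
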